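-- pv_equiv track=rewrite | github.com/daniel-reich/ubiquitous-fiesta | djJpmZPPBx3JaAqcK_16.py | maya_number
-- ===== SOURCE A (Python) =====
-- def maya_number(num):
--     d=['@','o','oo','ooo','oooo','-','o-','oo-','ooo-','oooo-','--','o--','oo--','ooo--','oooo--','---','o---','oo---','ooo---','oooo---']
--     maya_number = [] if num!=0 else ['@']
--     while num>0:
--         dig = num%20
--         maya_number += [d[dig]]
--         num //= 20
--     return maya_number[::-1]
-- ===== SOURCE B (Python) =====
-- def _glyph(d):
--     return '@' if d == 0 else 'o' * (d % 5) + '-' * (d // 5)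
--
-- def _digits(n):
--     if n <= 0:
--         return []
--     return _digits(n // 20) + [_glyph(n % 20)]
--
-- def maya_number(num):
--     if num < 0:
--         return []
--     if num == 0:
--         return ['@']
--     return _digits(num)
-- ===== Notes on version B (the rewrite author's own statement) =====
-- stated objective: alternative
-- what changed: B computes each Maya glyph by the closed-form arithmetic 'o'*(d%5)+'-'*(d//5) instead of A's 20-entry lookup table, and builds digits most-significant-first by recursion on n//20 instead of A's LSB-first while loop followed by a reversal.
import Mathlib
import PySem

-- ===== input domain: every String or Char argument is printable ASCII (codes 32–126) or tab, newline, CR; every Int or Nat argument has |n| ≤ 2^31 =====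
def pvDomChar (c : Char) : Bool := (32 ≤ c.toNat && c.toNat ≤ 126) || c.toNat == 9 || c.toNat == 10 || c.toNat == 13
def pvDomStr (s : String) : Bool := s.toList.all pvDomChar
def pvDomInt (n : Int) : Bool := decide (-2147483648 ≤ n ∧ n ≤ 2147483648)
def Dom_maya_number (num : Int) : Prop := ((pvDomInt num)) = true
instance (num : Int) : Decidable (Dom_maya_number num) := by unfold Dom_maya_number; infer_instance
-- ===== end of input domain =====

-- B renders each base-20 digit by the closed form 'o'*(d%5)+'-'*(d//5) instead of A's
-- 20-entry table, and builds digits most-significant-first by recursion instead of A's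
-- LSB-first while loop plus a reversal (objective: alternative; same asymptotic cost).

-- ===== PORT A =====
def mayaTableA : List String :=
  ["@","o","oo","ooo","oooo","-","o-","oo-","ooo-","oooo-","--","o--","oo--","ooo--","oooo--","---","o---","oo---","ooo---","oooo---"]

-- the while loop of A; dig = num % 20 is always in range, so pyGetD with a dummy default is exact
def mayaLoopA (num : Int) (acc : List String) : List String :=
  if _h : num > 0 then
    mayaLoopA (PySem.Int.floordiv num 20)
      (acc ++ [PySem.List.pyGetD mayaTableA (PySem.Int.mod num 20) ""])
  else acc
termination_by num.toNat
decreasing_by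
  rw [PySem.Int.floordiv_eq_ediv_of_pos (by omega)]
  omega

def maya_number (num : Int) : List String :=
  (PySem.List.slice? (mayaLoopA num (if num ≠ 0 then [] else ["@"])) none none (-1)).getD []

-- ===== PORT B =====
def mayaGlyph (d : Int) : String :=
  if d = 0 then "@"
  else String.ofList (List.replicate (PySem.Int.mod d 5).toNat 'o'
                  ++ List.replicate (PySem.Int.floordiv d 5).toNat '-')

def mayaDigits (n : Int) : List String :=
  if _h : n ≤ 0 then []
  else mayaDigits (PySem.Int.floordiv n 20) ++ [mayaGlyph (PySem.Int.mod n 20)]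
termination_by n.toNat
decreasing_by
  rw [PySem.Int.floordiv_eq_ediv_of_pos (by omega)]
  omega

def maya_number_alt (num : Int) : List String :=
  if num < 0 then []
  else if num = 0 then ["@"]
  else mayaDigits num

-- ===== PRECONDITION & SPEC =====
def Spec_maya_number (num : Int) (out : List String) : Prop := out = maya_number_alt num
instance (num : Int) (out : List String) : Decidable (Spec_maya_number num out) := by unfold Spec_maya_number; infer_instance

-- ===== CLAIM (what is proved, stated in full; the proofs are below) =====
def Claim_equal_maya_number : Prop := ∀ (num : Int), Dom_maya_number num → Spec_maya_number num (maya_number num)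

-- ===== LEMMAS AND PROOFS =====

-- the table entry at d equals the closed-form glyph, for every digit 0 ≤ d < 20
theorem table_eq_glyph (d : Int) (h0 : 0 ≤ d) (h1 : d < 20) :
    PySem.List.pyGetD mayaTableA d "" = mayaGlyph d := by
  interval_cases d <;> decide

-- the loop accumulates the LSB-first digit list after the initial accumulator
theorem mayaLoopA_acc (num : Int) (acc : List String) :
    mayaLoopA num acc = acc ++ mayaLoopA num [] := by
  by_cases h : num > 0
  · conv_lhs => rw [mayaLoopA]
    conv_rhs => rw [mayaLoopA]
    simp only [h, dif_pos]
    rw [mayaLoopA_acc (PySem.Int.floordiv num 20)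
        (acc ++ [PySem.List.pyGetD mayaTableA (PySem.Int.mod num 20) ""]),
      mayaLoopA_acc (PySem.Int.floordiv num 20)
        ([] ++ [PySem.List.pyGetD mayaTableA (PySem.Int.mod num 20) ""])]
    simp
  · conv_lhs => rw [mayaLoopA]
    conv_rhs => rw [mayaLoopA]
    simp [h]
termination_by num.toNat
decreasing_by
  all_goals rw [PySem.Int.floordiv_eq_ediv_of_pos (by omega)]
  all_goals omega

-- the reversed loop output is B's recursive digit list
theorem loop_reverse_eq_digits (num : Int) :
    (mayaLoopA num []).reverse = mayaDigits num := by
  by_cases h : num > 0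
  · rw [mayaLoopA, mayaDigits]
    simp only [h, dif_pos]
    have hle : ¬ num ≤ 0 := by omega
    simp only [hle, dif_neg, not_false_iff]
    rw [mayaLoopA_acc]
    have hm0 : 0 ≤ PySem.Int.mod num 20 := by
      have := PySem.Int.mod_eq_emod_of_pos (a := num) (b := 20) (by omega)
      omega
    have hm1 : PySem.Int.mod num 20 < 20 := by
      have := PySem.Int.mod_eq_emod_of_pos (a := num) (b := 20) (by omega)
      omega
    have ih := loop_reverse_eq_digits (PySem.Int.floordiv num 20)
    simp only [List.nil_append, List.reverse_append, List.reverse_cons,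
      List.reverse_nil, ih]
    rw [table_eq_glyph _ hm0 hm1]
  · rw [mayaLoopA, mayaDigits]
    simp only [h, dif_neg, not_false_iff]
    have hle : num ≤ 0 := by omega
    simp [hle]
termination_by num.toNat
decreasing_by
  all_goals rw [PySem.Int.floordiv_eq_ediv_of_pos (by omega)]
  all_goals omega

-- ===== VERDICT (by name: the statement is the Claim_ definition above) =====
theorem maya_number_spec : Claim_equal_maya_number := by
  intro num _
  unfold Spec_maya_number maya_number maya_number_alt
  rw [PySem.List.slice?_none_none_neg_one]
  simp only [Option.getD_some]
  by_cases h0 : num = 0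
  · subst h0
    rw [mayaLoopA]
    decide
  · have hinit : (if num ≠ 0 then ([] : List String) else ["@"]) = [] := by simp [h0]
    rw [hinit, loop_reverse_eq_digits]
    by_cases hn : num < 0
    · rw [mayaDigits, mayaDigits]
      have h1 : num ≤ 0 := by omega
      have h2 : ¬ num > 0 := by omega
      simp [h1, hn]
    · simp [hn, h0]
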